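-- pv_equiv track=rewrite | github.com/markku63/mooc-tira-s20 | splitlist.py | count
-- ===== SOURCE A (Python) =====
-- def count(t):
--     if len(t) < 2:
--         # alle kahden alkion  listaa ei voi jakaa
--         return 0
--
--     # vasemman puolen suurin < oikean puolen pienin
--     vmax = []
--     vmax.append(t[0])
--     for i in range(1, len(t) - 1):
--         vmax.append(max(vmax[i - 1], t[i]))
--
--     omin = [0] * (len(t) - 1)
--     omin [-1] = t[-1]
--     for i in range(len(t) - 3, -1, -1):
--         omin[i] = min(omin[i + 1], t[i + 1])
--
--     laskuri = 0
--     for i in range(len(t)-1):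
--         if vmax[i] < omin[i]:
--             laskuri += 1
--     return laskuri
-- ===== SOURCE B (Python) =====
-- def count(t):
--     if len(t) < 2:
--         # alle kahden alkion listaa ei voi jakaa
--         return 0
--
--     # sort-based order-statistics test: split i is valid iff the prefix
--     # t[:i+1] consists exactly of the i+1 smallest elements and is strictly
--     # below the rest, i.e. running prefix max m == s[i] and s[i] < s[i+1].
--     s = sorted(t)
--     laskuri = 0
--     m = t[0]
--     for i in range(len(t) - 1):
--         m = max(m, t[i])
--         if m == s[i] and s[i] < s[i + 1]:
--             laskuri += 1
--     return laskuri
-- ===== Notes on version B (the rewrite author's own statement) =====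
-- stated objective: alternative
-- what changed: B replaces A's prefix-max/suffix-min array comparison by a sort-based order-statistics test: with s = sorted(t), split i is valid iff the running prefix max equals s[i] and s[i] < s[i+1], so the suffix-min and vmax arrays disappear.
import Mathlib
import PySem

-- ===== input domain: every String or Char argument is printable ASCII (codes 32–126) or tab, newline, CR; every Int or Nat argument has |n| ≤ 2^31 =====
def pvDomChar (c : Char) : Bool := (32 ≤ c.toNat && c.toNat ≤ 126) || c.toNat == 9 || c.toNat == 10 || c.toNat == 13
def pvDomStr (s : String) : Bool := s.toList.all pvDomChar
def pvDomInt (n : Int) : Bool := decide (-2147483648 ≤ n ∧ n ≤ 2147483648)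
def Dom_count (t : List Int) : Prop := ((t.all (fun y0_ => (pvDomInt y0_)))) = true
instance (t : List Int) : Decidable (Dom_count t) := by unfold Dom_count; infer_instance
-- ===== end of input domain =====

-- B replaces A's prefix-max/suffix-min array comparison by a sort-based order-statistics test
-- (split i is valid iff the running prefix max equals sorted(t)[i] and sorted(t)[i] < sorted(t)[i+1]);
-- alternative algorithm, not claimed faster.

-- ===== PORT A =====
-- vmax = [t[0]]; for i in range(1, len(t)-1): vmax.append(max(vmax[i-1], t[i]))
def vmaxBuild (t : List Int) : List Int :=
  (PySem.List.pyRange 1 ((t.length : Int) - 1) 1).foldl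
    (fun vmax i =>
      vmax ++ [max (PySem.List.pyGetD vmax (i - 1) 0) (PySem.List.pyGetD t i 0)])
    [PySem.List.pyGetD t 0 0]

-- for i in range(len(t)-3, -1, -1): omin[i] = min(omin[i+1], t[i+1])   (countdown recursion: fuel k+1 handles index k)
def ominLoop (t : List Int) : Nat → List Int → List Int
  | 0, omin => omin
  | k + 1, omin =>
      ominLoop t k
        (PySem.List.pySetD omin (k : Int)
          (min (PySem.List.pyGetD omin ((k : Int) + 1) 0)
               (PySem.List.pyGetD t ((k : Int) + 1) 0)))

def count (t : List Int) : Int :=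
  if (t.length : Int) < 2 then 0
  else
    let vmax := vmaxBuild t
    -- omin = [0]*(len(t)-1); omin[-1] = t[-1]
    let omin0 := PySem.List.pySetD (List.replicate (t.length - 1) (0 : Int)) (-1)
                   (PySem.List.pyGetD t (-1) 0)
    let omin := ominLoop t (t.length - 2) omin0
    -- laskuri = 0; for i in range(len(t)-1): if vmax[i] < omin[i]: laskuri += 1
    (PySem.List.pyRange 0 ((t.length : Int) - 1) 1).foldl
      (fun laskuri i =>
        if PySem.List.pyGetD vmax i 0 < PySem.List.pyGetD omin i 0 then laskuri + 1 else laskuri)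
      0

-- ===== PORT B =====
-- s = sorted(t); laskuri = 0; m = t[0]
-- for i in range(len(t)-1): m = max(m, t[i]); if m == s[i] and s[i] < s[i+1]: laskuri += 1
def count_alt (t : List Int) : Int :=
  if (t.length : Int) < 2 then 0
  else
    let s := PySem.List.sorted t (fun x => x) false
    ((PySem.List.pyRange 0 ((t.length : Int) - 1) 1).foldl
      (fun (st : Int × Int) i =>
        let m := max st.2 (PySem.List.pyGetD t i 0)
        (if m = PySem.List.pyGetD s i 0 ∧
            PySem.List.pyGetD s i 0 < PySem.List.pyGetD s (i + 1) 0
         then st.1 + 1 else st.1, m))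
      (0, PySem.List.pyGetD t 0 0)).1

-- ===== PRECONDITION & SPEC =====
def Spec_count (t : List Int) (out : Int) : Prop := out = count_alt t
instance (t : List Int) (out : Int) : Decidable (Spec_count t out) := by unfold Spec_count; infer_instance

-- ===== CLAIM (what is proved, stated in full; the proofs are below) =====
def Claim_equal_count : Prop := ∀ (t : List Int), Dom_count t → Spec_count t (count t)

-- ===== LEMMAS AND PROOFS =====

-- ms t j = min(t[j:]) (0 on the empty suffix, which the proofs never use)
def ms (t : List Int) (j : Nat) : Int :=
  match t.drop j with
  | [] => 0
  | y :: ys => ys.foldl min y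

-- pm t k = max(t[:k+1]) (0 on the empty prefix, which the proofs never use)
def pm (t : List Int) (k : Nat) : Int :=
  match t.take (k + 1) with
  | [] => 0
  | y :: ys => ys.foldl max y

theorem ms_last (t : List Int) (h : t ≠ []) :
    ms t (t.length - 1) = t.getLast h := by
  unfold ms
  rw [List.drop_length_sub_one h]
  rfl

theorem ms_step (t : List Int) (j : Nat) (hj : j + 1 < t.length) :
    min (ms t (j + 1)) (t.getD j 0) = ms t j := by
  have h1 : t.drop j = t[j] :: t.drop (j + 1) := List.drop_eq_getElem_cons (by omega)
  have h2 : t.drop (j + 1) = t[j + 1] :: t.drop (j + 2) := List.drop_eq_getElem_cons hj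
  unfold ms
  rw [h1, h2]
  rw [List.getD_eq_getElem t 0 (by omega)]
  simp only [List.foldl_cons]
  rw [min_comm]
  exact List.foldl_assoc.symm

theorem pySetD_neg_one_set (xs : List Int) (v : Int) (h : xs ≠ []) :
    PySem.List.pySetD xs (-1) v = xs.set (xs.length - 1) v := by
  have h0 : 1 ≤ xs.length := List.length_pos_iff.mpr h
  simp only [PySem.List.pySetD, PySem.List.pySet?, PySem.List.pyIdx?]
  norm_num [h0]

theorem countP_pyRange_zero (n : Nat) (p : Int → Bool) (q : Nat → Bool)
    (h : ∀ k : Nat, k < n → p ((k : Nat) : Int) = q k) :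
    (PySem.List.pyRange 0 ((n : Nat) : Int) 1).countP p = (List.range n).countP q := by
  induction n with
  | zero => simp [PySem.List.pyRange_one_eq_nil]
  | succ m ih =>
    have hc : ((m + 1 : Nat) : Int) = ((m : Nat) : Int) + 1 := by push_cast; ring
    rw [hc, PySem.List.pyRange_one_succ_right (by positivity), List.range_succ,
        List.countP_append, List.countP_append]
    rw [ih (fun k hk => h k (by omega))]
    simp [h m (by omega)]

theorem ominLoop_getD (t : List Int) (f : Nat) (o : List Int)
    (ho : o.length = t.length - 1) (hf : f ≤ t.length - 2)
    (hinv : ∀ j : Nat, f ≤ j → j ≤ t.length - 2 → o.getD j 0 = ms t (j + 1)) :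
    ∀ j : Nat, j ≤ t.length - 2 → (ominLoop t f o).getD j 0 = ms t (j + 1) := by
  induction f generalizing o with
  | zero =>
    intro j hj
    simpa [ominLoop] using hinv j (Nat.zero_le j) hj
  | succ k ih =>
    intro j hj
    have hn3 : k + 3 ≤ t.length := by omega
    have e1 : ((k : Int) + 1) = (((k + 1 : Nat) : Nat) : Int) := by push_cast; ring
    have hv : min (PySem.List.pyGetD o ((k : Int) + 1) 0)
                  (PySem.List.pyGetD t ((k : Int) + 1) 0) = ms t (k + 1) := by
      rw [e1, PySem.List.pyGetD_natCast, PySem.List.pyGetD_natCast]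
      rw [hinv (k + 1) (le_refl _) (by omega)]
      exact ms_step t (k + 1) (by omega)
    simp only [ominLoop, PySem.List.pySetD_natCast, hv]
    refine ih _ (by simp [ho]) (by omega) ?_ j hj
    intro j' hj' hj2
    by_cases he : j' = k
    · subst he
      rw [List.getD_eq_getElem?_getD, List.getElem?_set_self (by omega)]
      rfl
    · rw [List.getD_eq_getElem?_getD, List.getElem?_set_ne (by omega), ← List.getD_eq_getElem?_getD]
      exact hinv j' (by omega) hj2

theorem pm_zero (t : List Int) (h : t ≠ []) : pm t 0 = t.getD 0 0 := by
  cases t with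
  | nil => exact absurd rfl h
  | cons a t' => simp [pm]
theorem pm_step (t : List Int) (k : Nat) (hk : k + 1 < t.length) :
    pm t (k + 1) = max (pm t k) (t.getD (k + 1) 0) := by
  have hE2 : t.take (k + 2) = t.take (k + 1) ++ [t[k+1]] := by
    rw [List.take_add_one]
    simp [List.getElem?_eq_getElem hk]
  unfold pm
  rcases hE : t.take (k + 1) with _ | ⟨y, ys⟩
  · have : (t.take (k+1)).length = k+1 := by simp; omega
    rw [hE] at this; simp at this
  · rw [hE] at hE2
    rw [hE2]
    simp only [List.cons_append, List.foldl_append, List.foldl_cons, List.foldl_nil]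
    rw [List.getD_eq_getElem t 0 hk]
theorem pm_step' (t : List Int) (j : Nat) (hj : j < t.length) :
    max (pm t (j - 1)) (t.getD j 0) = pm t j := by
  cases j with
  | zero =>
    have ht : t ≠ [] := by intro e; rw [e] at hj; simp at hj
    simp [pm_zero t ht]
  | succ k => simpa using (pm_step t k hj).symm

theorem pm_mem (t : List Int) (k : Nat) (hk : k < t.length) : pm t k ∈ t.take (k + 1) := by
  unfold pm
  rcases hE : t.take (k + 1) with _ | ⟨y, ys⟩
  · have : (t.take (k+1)).length = k+1 := by simp; omega
    rw [hE] at this; simp at this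
  · exact ((List.max?_eq_some_iff (xs := y::ys)).1 rfl).1
theorem le_pm (t : List Int) (k : Nat) :
    ∀ x ∈ t.take (k + 1), x ≤ pm t k := by
  unfold pm
  rcases hE : t.take (k + 1) with _ | ⟨y, ys⟩
  · intro x hx; simp at hx
  · exact fun x hx => ((List.max?_eq_some_iff (xs := y::ys)).1 rfl).2 x hx
theorem ms_mem (t : List Int) (j : Nat) (hj : j < t.length) : ms t j ∈ t.drop j := by
  have h1 : t.drop j = t[j] :: t.drop (j + 1) := List.drop_eq_getElem_cons hj
  unfold ms; rw [h1]
  exact List.min?_mem (xs := t[j] :: t.drop (j+1)) rfl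
theorem ms_le (t : List Int) (j : Nat) (hj : j < t.length) :
    ∀ x ∈ t.drop j, ms t j ≤ x := by
  have h1 : t.drop j = t[j] :: t.drop (j + 1) := List.drop_eq_getElem_cons hj
  unfold ms; rw [h1]
  exact fun x hx => ((List.min?_eq_some_iff (xs := t[j] :: t.drop (j+1))).1 rfl).2 x hx

theorem char_lemma (t : List Int) (k : Nat) (hk : k + 1 < t.length) :
    (pm t k = (PySem.List.sorted t (fun x => x) false).getD k 0 ∧
     (PySem.List.sorted t (fun x => x) false).getD k 0 <
       (PySem.List.sorted t (fun x => x) false).getD (k + 1) 0) ↔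
    pm t k < ms t (k + 1) := by
  set s := PySem.List.sorted t (fun x => x) false with hs
  have hperm : s.Perm t := PySem.List.sorted_perm t _ false
  have hlen : s.length = t.length := hperm.length_eq
  have hpw : s.Pairwise (· ≤ ·) := PySem.List.sorted_pairwise t (fun x => x)
  have hgk : s.getD k 0 = s[k]'(by omega) := List.getD_eq_getElem s 0 (by omega)
  have hgk1 : s.getD (k+1) 0 = s[k+1]'(by omega) := List.getD_eq_getElem s 0 (by omega)
  constructor
  · rintro ⟨h1, h2⟩
    have hmsS : ms t (k+1) ∈ t.drop (k+1) := ms_mem t (k+1) hk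
    -- show every element of the suffix is > pm t k
    have key : ∀ x ∈ t.drop (k+1), pm t k < x := by
      intro x hx
      by_contra hle
      push_neg at hle
      set p : Int → Bool := fun y => decide (y ≤ pm t k) with hp
      have c1 : t.countP p = (t.take (k+1)).countP p + (t.drop (k+1)).countP p := by
        conv_lhs => rw [← List.take_append_drop (k+1) t]
        rw [List.countP_append]
      have c2 : (t.take (k+1)).countP p = k+1 := by
        rw [List.countP_eq_length.mpr (fun y hy => by simpa [hp] using le_pm t k y hy)]
        simp; omega
      have c3 : 0 < (t.drop (k+1)).countP p :=
        List.countP_pos_iff.mpr ⟨x, hx, by simpa [hp] using hle⟩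
      have c4 : s.countP p = t.countP p := hperm.countP_congr (fun _ _ => rfl)
      have c5 : s.countP p ≤ k+1 := by
        conv_lhs => rw [← List.take_append_drop (k+1) s]
        rw [List.countP_append]
        have hta : (s.take (k+1)).countP p ≤ k+1 := by
          calc (s.take (k+1)).countP p ≤ (s.take (k+1)).length := List.countP_le_length
          _ ≤ k+1 := by simp
        have hdr : (s.drop (k+1)).countP p = 0 := by
          rw [List.countP_eq_zero]
          have hd : s.drop (k+1) = s[k+1]'(by omega) :: s.drop (k+2) :=
            List.drop_eq_getElem_cons (by omega)
          have hpwd : (s.drop (k+1)).Pairwise (· ≤ ·) := hpw.sublist (List.drop_sublist _ _)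
          rw [hd] at hpwd
          intro y hy
          rw [hd] at hy
          have hgt : s[k]'(by omega) < y := by
            rcases List.mem_cons.1 hy with h | h
            · rw [hgk, hgk1] at h2; rw [h]; exact h2
            · have := (List.pairwise_cons.1 hpwd).1 y h
              rw [hgk, hgk1] at h2
              exact lt_of_lt_of_le h2 this
          simp [hp]
          rw [h1, hgk]
          exact hgt
        omega
      omega
    exact key _ hmsS
  · intro h
    have hPS : ∀ x ∈ t.take (k+1), ∀ y ∈ t.drop (k+1), x < y := by
      intro x hx y hy
      exact lt_of_le_of_lt (le_pm t k x hx) (lt_of_lt_of_le h (ms_le t (k+1) hk y hy))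
    set ys := PySem.List.sorted (t.take (k+1)) (fun x => x) false ++
              PySem.List.sorted (t.drop (k+1)) (fun x => x) false with hys
    have hyperm : ys.Perm t := by
      have := List.Perm.append (PySem.List.sorted_perm (t.take (k+1)) (fun x => x) false)
        (PySem.List.sorted_perm (t.drop (k+1)) (fun x => x) false)
      rwa [List.take_append_drop] at this
    have hypw : ys.Pairwise (· ≤ ·) := by
      rw [hys, List.pairwise_append]
      refine ⟨PySem.List.sorted_pairwise _ _, PySem.List.sorted_pairwise _ _, ?_⟩
      intro a ha b hb
      rw [PySem.List.mem_sorted] at ha hb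
      exact le_of_lt (hPS a ha b hb)
    have hse : s = ys := PySem.List.sorted_id_eq_of_perm_of_pairwise t ys hyperm hypw
    have hlenP : (PySem.List.sorted (t.take (k+1)) (fun x => x) false).length = k+1 := by
      rw [PySem.List.length_sorted]; simp; omega
    -- s[k] = pm t k
    have hskP : s[k]'(by omega) = (PySem.List.sorted (t.take (k+1)) (fun x => x) false)[k]'(by omega) := by
      rw [List.getElem_of_eq hse]
      exact List.getElem_append_left (by omega)
    have hselP : (PySem.List.sorted (t.take (k+1)) (fun x => x) false)[k]'(by omega) = pm t k := by
      apply le_antisymm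
      · apply le_pm t k
        rw [← PySem.List.mem_sorted (t.take (k+1)) (fun x => x) false]
        exact List.getElem_mem _
      · have hm : pm t k ∈ PySem.List.sorted (t.take (k+1)) (fun x => x) false := by
          rw [PySem.List.mem_sorted]; exact pm_mem t k (by omega)
        obtain ⟨j, hj, hje⟩ := List.mem_iff_getElem.mp hm
        rw [← hje]
        exact PySem.List.key_sorted_getElem_mono _ (fun x => x) (by omega) (by omega)
    have hsk1S : s[k+1]'(by omega) = (PySem.List.sorted (t.drop (k+1)) (fun x => x) false)[0]'(by
        rw [PySem.List.length_sorted]; simp; omega) := by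
      rw [List.getElem_of_eq hse]
      rw [List.getElem_append_right (by omega)]
      congr 1
      omega
    have hselS : (PySem.List.sorted (t.drop (k+1)) (fun x => x) false)[0]'(by
        rw [PySem.List.length_sorted]; simp; omega) = ms t (k+1) := by
      apply le_antisymm
      · have hm : ms t (k+1) ∈ PySem.List.sorted (t.drop (k+1)) (fun x => x) false := by
          rw [PySem.List.mem_sorted]; exact ms_mem t (k+1) hk
        obtain ⟨j, hj, hje⟩ := List.mem_iff_getElem.mp hm
        rw [← hje]
        exact PySem.List.key_sorted_getElem_mono _ (fun x => x) (by omega) (by omega)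
      · apply ms_le t (k+1) hk
        rw [← PySem.List.mem_sorted (t.drop (k+1)) (fun x => x) false]
        exact List.getElem_mem _
    constructor
    · rw [hgk, hskP, hselP]
    · rw [hgk, hgk1, hskP, hselP, hsk1S, hselS]
      exact h
theorem vmax_aux (t : List Int) (h2 : 2 ≤ t.length) (j : Nat) (hj : j ≤ t.length - 2) :
    (PySem.List.pyRange 1 (1 + (j : Int)) 1).foldl
      (fun vmax i =>
        vmax ++ [max (PySem.List.pyGetD vmax (i - 1) 0) (PySem.List.pyGetD t i 0)])
      [PySem.List.pyGetD t 0 0]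
    = (List.range (j + 1)).map (pm t) := by
  induction j with
  | zero =>
    rw [PySem.List.pyRange_one_eq_nil (by omega)]
    simp only [List.foldl_nil, List.range_succ, List.range_zero, List.map_cons, List.map_nil,
      List.nil_append]
    rw [PySem.List.pyGetD_ofNat', pm_zero t (by intro e; rw [e] at h2; simp at h2)]
  | succ m ih =>
    have hcast : (1 : Int) + ((m + 1 : Nat) : Int) = (1 + (m : Int)) + 1 := by push_cast; ring
    rw [hcast, PySem.List.pyRange_one_succ_right (by omega), List.foldl_append]
    rw [ih (by omega)]
    simp only [List.foldl_cons, List.foldl_nil]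
    have e1 : (1 : Int) + (m : Int) - 1 = ((m : Nat) : Int) := by ring
    have e2 : (1 : Int) + (m : Int) = (((m + 1 : Nat) : Nat) : Int) := by push_cast; ring
    rw [e1, e2, PySem.List.pyGetD_natCast, PySem.List.pyGetD_natCast]
    rw [PySem.List.getD_map_range _ _ _ _ (by omega)]
    have : max (pm t m) (t.getD (m + 1) 0) = pm t (m + 1) := (pm_step t m (by omega)).symm
    rw [this]
    conv_rhs => rw [List.range_succ]
    simp
theorem vmax_eq (t : List Int) (h2 : 2 ≤ t.length) :
    vmaxBuild t = (List.range (t.length - 1)).map (pm t) := by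
  have hcast : ((t.length : Int) - 1) = 1 + ((t.length - 2 : Nat) : Int) := by
    rw [Nat.cast_sub h2]; push_cast; ring
  unfold vmaxBuild
  rw [hcast, vmax_aux t h2 (t.length - 2) (le_refl _)]
  have he : t.length - 2 + 1 = t.length - 1 := by omega
  rw [he]

theorem bLoop_eq (t s : List Int) (h2 : 2 ≤ t.length) (j : Nat) (hj : j ≤ t.length - 1) :
    (PySem.List.pyRange 0 ((j : Nat) : Int) 1).foldl
      (fun (st : Int × Int) i =>
        let m := max st.2 (PySem.List.pyGetD t i 0)
        (if m = PySem.List.pyGetD s i 0 ∧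
            PySem.List.pyGetD s i 0 < PySem.List.pyGetD s (i + 1) 0
         then st.1 + 1 else st.1, m))
      (0, PySem.List.pyGetD t 0 0)
    = ((((List.range j).countP
          (fun k => decide (pm t k = s.getD k 0 ∧ s.getD k 0 < s.getD (k + 1) 0)) : Nat) : Int),
       pm t (j - 1)) := by
  induction j with
  | zero =>
    rw [PySem.List.pyRange_one_eq_nil (by omega)]
    simp only [List.foldl_nil, List.range_zero, List.countP_nil, Nat.cast_zero, Nat.zero_sub]
    rw [PySem.List.pyGetD_ofNat', pm_zero t (by intro e; rw [e] at h2; simp at h2)]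
  | succ m ih =>
    have hcast : ((m + 1 : Nat) : Int) = ((m : Nat) : Int) + 1 := by push_cast; ring
    rw [hcast, PySem.List.pyRange_one_succ_right (by positivity), List.foldl_append]
    rw [ih (by omega)]
    simp only [List.foldl_cons, List.foldl_nil]
    have hc1 : ((m : Nat) : Int) + 1 = (((m + 1 : Nat) : Nat) : Int) := by push_cast; ring
    simp only [hc1, PySem.List.pyGetD_natCast]
    have hm : max (pm t (m - 1)) (t.getD m 0) = pm t m := pm_step' t m (by omega)
    rw [hm]
    rw [List.range_succ, List.countP_append]
    refine Prod.ext ?_ rfl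
    simp only [List.countP_cons, List.countP_nil]
    by_cases hcond : pm t m = s.getD m 0 ∧ s.getD m 0 < s.getD (m + 1) 0
    · rw [if_pos hcond]
      simp only [hcond, and_self, decide_true, if_true]
      push_cast; ring
    · rw [if_neg hcond]
      simp only [decide_eq_true_eq, hcond, if_false]
      push_cast; ring

-- ===== VERDICT (by name: the statement is the Claim_ definition above) =====
theorem count_spec : Claim_equal_count := by
  intro t _
  unfold Spec_count count count_alt
  by_cases h2 : (t.length : Int) < 2
  · rw [if_pos h2, if_pos h2]
  · rw [if_neg h2, if_neg h2]
    have hn : 2 ≤ t.length := by omega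
    have ht : t ≠ [] := by intro e; rw [e] at hn; simp at hn
    have hlast : PySem.List.pyGetD t (-1) 0 = ms t (t.length - 1) := by
      rw [PySem.List.pyGetD_neg_one t 0 ht, ms_last t ht]
    have homin : ∀ j : Nat, j ≤ t.length - 2 →
        (ominLoop t (t.length - 2)
          (PySem.List.pySetD (List.replicate (t.length - 1) (0 : Int)) (-1)
            (ms t (t.length - 1)))).getD j 0 = ms t (j + 1) := by
      have hset := pySetD_neg_one_set (List.replicate (t.length - 1) (0 : Int))
        (ms t (t.length - 1)) (by simp; omega)
      refine ominLoop_getD t _ _ ?_ (le_refl _) ?_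
      · rw [hset]; simp
      · intro j hj1 hj2
        have hj : j = t.length - 2 := by omega
        subst hj
        rw [hset, List.getD_eq_getElem?_getD, List.length_replicate]
        have hidx : t.length - 1 - 1 = t.length - 2 := by omega
        rw [hidx, List.getElem?_set_self (by simp; omega)]
        simp only [Option.getD_some]
        congr 1
        omega
    have hjcast : ((t.length : Int) - 1) = (((t.length - 1 : Nat) : Nat) : Int) := by
      rw [Nat.cast_sub (by omega)]; push_cast; ring
    have hpred : ∀ k : Nat, k < t.length - 1 →
        (decide (PySem.List.pyGetD (vmaxBuild t) ((k : Nat) : Int) 0 <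
          PySem.List.pyGetD (ominLoop t (t.length - 2)
            (PySem.List.pySetD (List.replicate (t.length - 1) (0 : Int)) (-1)
              (ms t (t.length - 1)))) ((k : Nat) : Int) 0))
        = decide (pm t k < ms t (k + 1)) := by
      intro k hk
      rw [PySem.List.pyGetD_natCast, PySem.List.pyGetD_natCast, homin k (by omega),
          vmax_eq t hn, PySem.List.getD_map_range _ _ _ _ (by omega)]
    have hchar : ∀ k ∈ List.range (t.length - 1),
        ((decide (pm t k < ms t (k + 1))) = true ↔
         (decide (pm t k = (PySem.List.sorted t (fun x => x) false).getD k 0 ∧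
            (PySem.List.sorted t (fun x => x) false).getD k 0 <
              (PySem.List.sorted t (fun x => x) false).getD (k + 1) 0)) = true) := by
      intro k hk
      rw [List.mem_range] at hk
      simp only [decide_eq_true_eq]
      exact (char_lemma t k (by omega)).symm
    have hB := bLoop_eq t (PySem.List.sorted t (fun x => x) false) hn (t.length - 1) (le_refl _)
    simp only [hlast, hjcast]
    rw [PySem.List.foldl_ite_add_one]
    rw [countP_pyRange_zero (t.length - 1) _ (fun k => decide (pm t k < ms t (k + 1))) hpred]
    rw [List.countP_congr hchar]
    rw [hB]
    simp
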